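-- pv_equiv track=rewrite | github.com/parzival-hub/NoSQL | input_finder.py | escape_reserved_characters
-- ===== SOURCE A (Python) =====
-- def escape_reserved_characters(input_string):
--     # List of reserved characters and their escaped versions
--     reserved_characters = {
--         '.': r'\.',
--         '^': r'\^',
--         '$': r'\$',
--         '*': r'\*',
--         '+': r'\+',
--         '?': r'\?',
--         '[':r'\[',
--         ']':r'\]',
--         '(': r'\(',
--         ')': r'\)',
--         '|': r'\|',
--     }
--
--     # Escape all reserved characters in the input string
--     for char, escaped_char in reserved_characters.items():
--         input_string = input_string.replace(char, escaped_char)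
--
--     return input_string
-- ===== SOURCE B (Python) =====
-- def escape_reserved_characters(input_string):
--     reserved = set('.^$*+?[]()|')
--     out = []
--     for c in input_string:
--         if c in reserved:
--             out.append('\\')
--         out.append(c)
--     return ''.join(out)
-- ===== Notes on version B (the rewrite author's own statement) =====
-- stated objective: alternative
-- what changed: Replaced the 11 sequential whole-string .replace passes with one single pass over the input characters, consulting a set of reserved characters and emitting a backslash before each reserved one.
import Mathlib
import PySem

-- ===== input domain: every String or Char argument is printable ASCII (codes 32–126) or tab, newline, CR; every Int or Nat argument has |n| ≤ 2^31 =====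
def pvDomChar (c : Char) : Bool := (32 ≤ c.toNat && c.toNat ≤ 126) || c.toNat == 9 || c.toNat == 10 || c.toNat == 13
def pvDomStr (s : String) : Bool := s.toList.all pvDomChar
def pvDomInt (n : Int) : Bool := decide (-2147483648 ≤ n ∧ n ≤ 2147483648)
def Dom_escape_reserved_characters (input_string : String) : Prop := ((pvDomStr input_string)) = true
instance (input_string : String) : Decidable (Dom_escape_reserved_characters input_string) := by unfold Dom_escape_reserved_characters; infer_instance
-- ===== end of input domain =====

-- B replaces A's 11 sequential whole-string replace passes by one single pass over the
-- characters with a set lookup (objective: alternative traversal, one pass instead of 11).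

-- ===== PORT A =====
-- the dict literal 'reserved_characters' as an association list in insertion order
def pvEscPairs : List (String × String) :=
  [(".", "\\."), ("^", "\\^"), ("$", "\\$"), ("*", "\\*"), ("+", "\\+"), ("?", "\\?"),
   ("[", "\\["), ("]", "\\]"), ("(", "\\("), (")", "\\)"), ("|", "\\|")]

-- for char, escaped_char in reserved_characters.items(): input_string = input_string.replace(char, escaped_char)
def escape_reserved_characters (input_string : String) : String :=
  pvEscPairs.foldl (fun s cp => PySem.Str.replace s cp.1 cp.2) input_string

-- ===== PORT B =====
-- reserved = set('.^$*+?[]()|')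
def pvReserved : PySem.Set Char :=
  PySem.Set.ofList ['.', '^', '$', '*', '+', '?', '[', ']', '(', ')', '|']

-- out = []; for c in input_string: if c in reserved: out.append('\\'); out.append(c); return ''.join(out)
def escape_reserved_characters_alt (input_string : String) : String :=
  String.ofList (input_string.toList.foldl
    (fun out c => (if PySem.Set.contains pvReserved c then out ++ ['\\'] else out) ++ [c]) [])

-- ===== PRECONDITION & SPEC =====
def Spec_escape_reserved_characters (input_string : String) (out : String) : Prop := out = escape_reserved_characters_alt input_string
instance (input_string : String) (out : String) : Decidable (Spec_escape_reserved_characters input_string out) := by unfold Spec_escape_reserved_characters; infer_instance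

-- ===== CLAIM (what is proved, stated in full; the proofs are below) =====
def Claim_equal_escape_reserved_characters : Prop := ∀ (input_string : String), Dom_escape_reserved_characters input_string → Spec_escape_reserved_characters input_string (escape_reserved_characters input_string)

-- ===== LEMMAS AND PROOFS =====

-- the effect of one replace pass on a single character
def escF (c : Char) (x : Char) : List Char := if x = c then ['\\', c] else [x]
-- the effect of B's single pass on a single character
def escG (x : Char) : List Char := if PySem.Set.contains pvReserved x then ['\\', x] else [x]

lemma go_single (c : Char) (r : List Char) :
    ∀ (l acc : List Char) (fuel : Nat), l.length ≤ fuel →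
      PySem.Chars.replace.go [c] r fuel l acc
        = acc.reverse ++ l.flatMap (fun x => if x = c then r else [x]) := by
  intro l
  induction l with
  | nil =>
      intro acc fuel _
      cases fuel <;> simp [PySem.Chars.replace.go]
  | cons a t ih =>
      intro acc fuel h
      cases fuel with
      | zero => simp at h
      | succ n =>
          by_cases hc : c = a
          · subst hc
            have hpre : List.isPrefixOf [c] (c :: t) = true := by
              simp [List.isPrefixOf]
            simp only [PySem.Chars.replace.go, hpre, if_true]
            rw [show List.drop [c].length (c :: t) = t from rfl]
            rw [ih _ n (by simpa using h)]
            simp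
          · have hpre : List.isPrefixOf [c] (a :: t) = false := by
              simp [List.isPrefixOf, hc]
            simp only [PySem.Chars.replace.go, hpre, Bool.false_eq_true, if_false]
            rw [ih _ n (by simpa using h)]
            have hac : ¬ a = c := fun h' => hc h'.symm
            simp [hac]

lemma replace_single (c : Char) (r : List Char) (l : List Char) :
    PySem.Chars.replace l [c] r = l.flatMap (fun x => if x = c then r else [x]) := by
  rw [PySem.Chars.replace]
  simp only [List.isEmpty_cons, if_false, Bool.false_eq_true]
  simpa using go_single c r l [] l.length le_rfl

-- the composition of the 11 per-character replace passes
def chainF (l : List Char) : List Char :=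
  ((((((((((l.flatMap (escF '.')).flatMap (escF '^')).flatMap (escF '$')).flatMap
    (escF '*')).flatMap (escF '+')).flatMap (escF '?')).flatMap (escF '[')).flatMap
    (escF ']')).flatMap (escF '(')).flatMap (escF ')')).flatMap (escF '|')

lemma chainF_append (l₁ l₂ : List Char) : chainF (l₁ ++ l₂) = chainF l₁ ++ chainF l₂ := by
  simp [chainF, List.flatMap_append]

lemma chainF_single (a : Char) : chainF [a] = escG a := by
  by_cases hm : a ∈ (['.', '^', '$', '*', '+', '?', '[', ']', '(', ')', '|'] : List Char)
  · simp only [List.mem_cons, List.not_mem_nil, or_false] at hm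
    rcases hm with h|h|h|h|h|h|h|h|h|h|h <;> subst h <;> decide
  · simp only [List.mem_cons, List.not_mem_nil, or_false, not_or] at hm
    obtain ⟨h1, h2, h3, h4, h5, h6, h7, h8, h9, h10, h11⟩ := hm
    simp [chainF, escF, escG, pvReserved, PySem.Set.mem_ofList,
      h1, h2, h3, h4, h5, h6, h7, h8, h9, h10, h11]

lemma chainF_eq (l : List Char) : chainF l = l.flatMap escG := by
  induction l with
  | nil => simp [chainF]
  | cons a t ih =>
      rw [show a :: t = [a] ++ t from rfl, chainF_append, ih, chainF_single]
      simp

lemma A_toList (s : String) :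
    (escape_reserved_characters s).toList = chainF s.toList := by
  simp only [escape_reserved_characters, pvEscPairs, List.foldl_cons, List.foldl_nil]
  simp only [PySem.Str.toList_replace]
  have e1 : ("." : String).toList = ['.'] := rfl
  have e2 : ("^" : String).toList = ['^'] := rfl
  have e3 : ("$" : String).toList = ['$'] := rfl
  have e4 : ("*" : String).toList = ['*'] := rfl
  have e5 : ("+" : String).toList = ['+'] := rfl
  have e6 : ("?" : String).toList = ['?'] := rfl
  have e7 : ("[" : String).toList = ['['] := rfl
  have e8 : ("]" : String).toList = [']'] := rfl
  have e9 : ("(" : String).toList = ['('] := rfl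
  have e10 : (")" : String).toList = [')'] := rfl
  have e11 : ("|" : String).toList = ['|'] := rfl
  have f1 : ("\\." : String).toList = ['\\', '.'] := rfl
  have f2 : ("\\^" : String).toList = ['\\', '^'] := rfl
  have f3 : ("\\$" : String).toList = ['\\', '$'] := rfl
  have f4 : ("\\*" : String).toList = ['\\', '*'] := rfl
  have f5 : ("\\+" : String).toList = ['\\', '+'] := rfl
  have f6 : ("\\?" : String).toList = ['\\', '?'] := rfl
  have f7 : ("\\[" : String).toList = ['\\', '['] := rfl
  have f8 : ("\\]" : String).toList = ['\\', ']'] := rfl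
  have f9 : ("\\(" : String).toList = ['\\', '('] := rfl
  have f10 : ("\\)" : String).toList = ['\\', ')'] := rfl
  have f11 : ("\\|" : String).toList = ['\\', '|'] := rfl
  simp only [e1, e2, e3, e4, e5, e6, e7, e8, e9, e10, e11,
    f1, f2, f3, f4, f5, f6, f7, f8, f9, f10, f11, replace_single]
  rfl

lemma B_foldl (l acc : List Char) :
    l.foldl (fun out c => (if PySem.Set.contains pvReserved c then out ++ ['\\'] else out) ++ [c]) acc
      = acc ++ l.flatMap escG := by
  induction l generalizing acc with
  | nil => simp
  | cons a t ih =>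
      rw [List.foldl_cons, ih]
      by_cases h : a ∈ pvReserved <;> simp [escG, h]

-- ===== VERDICT (by name: the statement is the Claim_ definition above) =====
theorem escape_reserved_characters_spec : Claim_equal_escape_reserved_characters := by
  intro s _
  unfold Spec_escape_reserved_characters escape_reserved_characters_alt
  rw [← String.toList_inj, A_toList, chainF_eq, String.toList_ofList, B_foldl]
  simp
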